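-- pv_equiv track=rewrite | github.com/SCHVRevan/Methods_of_cryptographic_information_protection | Lab3-Feistel-diff/findDelta.py | find_delta
-- ===== SOURCE A (Python) =====
-- def find_delta(delta_A, delta_C, permutation):
--     result = []
--
--     for a, c in zip(delta_A, delta_C):
--         valid = True
--         seen_positions = {}
--
--         for index, mapped_index in enumerate(permutation):
--             if mapped_index in seen_positions:
--                 if a[seen_positions[mapped_index]] != a[index]:
--                     valid = False
--                     break
--             else:
--                 seen_positions[mapped_index] = index
--
--         if valid:
--             result.append((a, c))
--
--     return result
-- ===== SOURCE B (Python) =====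
-- def find_delta(delta_A, delta_C, permutation):
--     # Phase 1 (once): group the positions of the permutation by value.
--     groups = {}
--     for index, value in enumerate(permutation):
--         groups.setdefault(value, []).append(index)
--     # Phase 2 (once): derive the equality constraints (first occurrence, later occurrence).
--     constraints = [(groups[value][0], index)
--                    for index, value in enumerate(permutation)
--                    if groups[value][0] != index]
--     # Phase 3: keep a pair iff every constraint holds on a.
--     return [(a, c) for a, c in zip(delta_A, delta_C)
--             if all(a[f] == a[i] for f, i in constraints)]
-- ===== Notes on version B (the rewrite author's own statement) =====
-- stated objective: alternative
-- what changed: B analyses the permutation once up front (position groups by value, flattened to a fixed list of (first-occurrence, later-occurrence) constraint pairs) and then filters the zipped pairs with a short-circuiting all() over that list, instead of A's per-pair incremental scan that rebuilds a first-seen-position dict for every (a,c) pair.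
-- outside the precondition, e.g. on find_delta([[0, 1]], [[9]], [1, 1, 2, 2]): A returns [], B returns []
import Mathlib
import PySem

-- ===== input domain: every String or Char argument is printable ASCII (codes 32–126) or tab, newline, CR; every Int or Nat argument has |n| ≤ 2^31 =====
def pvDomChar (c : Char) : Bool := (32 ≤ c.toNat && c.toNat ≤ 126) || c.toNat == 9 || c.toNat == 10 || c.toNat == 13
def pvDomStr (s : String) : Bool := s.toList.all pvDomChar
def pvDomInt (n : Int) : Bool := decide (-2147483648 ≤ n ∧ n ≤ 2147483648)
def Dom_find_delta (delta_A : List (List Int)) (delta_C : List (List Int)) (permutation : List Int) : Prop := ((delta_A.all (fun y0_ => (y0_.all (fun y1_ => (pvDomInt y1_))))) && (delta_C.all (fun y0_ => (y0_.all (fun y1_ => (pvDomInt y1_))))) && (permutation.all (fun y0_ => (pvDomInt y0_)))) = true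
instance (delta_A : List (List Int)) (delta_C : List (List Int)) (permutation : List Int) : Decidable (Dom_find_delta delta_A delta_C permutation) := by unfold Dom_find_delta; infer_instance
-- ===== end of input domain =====

-- B analyses the permutation once (position groups by value, flattened to constraint pairs)
-- and filters the zipped pairs with one all() over that list, instead of A's per-pair
-- incremental first-seen scan; B and A agree (including on which inputs they raise).

-- ===== PORT A =====
-- inner loop of A: "for index, mapped_index in enumerate(permutation)" with break on mismatch;
-- a[i] ported as pyGetD a i 0: under Pre_ every accessed index is in range, where it agrees with Python indexing
def pvGoA (a : List Int) : List (Int × Int) → PySem.Dict Int Int → Bool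
  | [], _ => true
  | (index, mapped) :: rest, seen =>
    match seen.get? mapped with
    | some pos =>
      if PySem.List.pyGetD a pos 0 ≠ PySem.List.pyGetD a index 0 then false
      else pvGoA a rest seen
    | none => pvGoA a rest (seen.insert mapped index)

def find_delta (delta_A : List (List Int)) (delta_C : List (List Int)) (permutation : List Int) : List (List Int × List Int) :=
  (delta_A.zip delta_C).foldl
    (fun result p =>
      if pvGoA p.1 (PySem.List.enumerate permutation) PySem.Dict.empty
      then result ++ [p] else result) []

-- ===== PORT B =====
-- Phase 1 of B: groups: value -> list of positions (Python: groups.setdefault(value, []).append(index))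
def pvGroups (permutation : List Int) : PySem.Dict Int (List Int) :=
  (PySem.List.enumerate permutation).foldl
    (fun g p => g.modify p.2 [] (fun l => l ++ [p.1])) PySem.Dict.empty

-- Phase 2 of B: [(groups[value][0], index) for index, value in enumerate(permutation) if groups[value][0] != index]
-- groups[value] always exists and is nonempty, so getD []/pyGetD 0 agree with Python's groups[value][0]
def pvConstraints (permutation : List Int) : List (Int × Int) :=
  ((PySem.List.enumerate permutation).filter
      (fun p => PySem.List.pyGetD ((pvGroups permutation).getD p.2 []) 0 0 != p.1)).map
    (fun p => (PySem.List.pyGetD ((pvGroups permutation).getD p.2 []) 0 0, p.1))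

-- Phase 3 of B: the filtering comprehension with all()
def find_delta_alt (delta_A : List (List Int)) (delta_C : List (List Int)) (permutation : List Int) : List (List Int × List Int) :=
  (delta_A.zip delta_C).filter
    (fun p => (pvConstraints permutation).all
      (fun fi => PySem.List.pyGetD p.1 fi.1 0 == PySem.List.pyGetD p.1 fi.2 0))

-- ===== PRECONDITION & SPEC =====
-- Pre_ requires each zipped row to cover every duplicate position of the permutation; on shorter
-- rows Python indexing can raise IndexError (in A and B alike — the two Pythons raise on exactly the
-- same inputs, and return the same value on the excluded inputs where the early mismatch stops both first).
def Pre_find_delta (delta_A : List (List Int)) (delta_C : List (List Int)) (permutation : List Int) : Prop :=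
  ∀ p ∈ delta_A.zip delta_C, ∀ j < permutation.length,
    (∃ i < j, permutation.getD i 0 = permutation.getD j 0) → j < p.1.length
instance (delta_A : List (List Int)) (delta_C : List (List Int)) (permutation : List Int) : Decidable (Pre_find_delta delta_A delta_C permutation) := by unfold Pre_find_delta; infer_instance

def pvWitness_find_delta : List (List Int) × List (List Int) × List Int := ([[1, 2, 3]], [[4]], [0, 1, 0])

def Spec_find_delta (delta_A : List (List Int)) (delta_C : List (List Int)) (permutation : List Int) (out : List (List Int × List Int)) : Prop := out = find_delta_alt delta_A delta_C permutation
instance (delta_A : List (List Int)) (delta_C : List (List Int)) (permutation : List Int) (out : List (List Int × List Int)) : Decidable (Spec_find_delta delta_A delta_C permutation out) := by unfold Spec_find_delta; infer_instance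

-- ===== CLAIM (what is proved, stated in full; the proofs are below) =====
def Claim_equal_find_delta : Prop := ∀ (delta_A : List (List Int)) (delta_C : List (List Int)) (permutation : List Int), Dom_find_delta delta_A delta_C permutation → Pre_find_delta delta_A delta_C permutation → Spec_find_delta delta_A delta_C permutation (find_delta delta_A delta_C permutation)

-- ===== LEMMAS AND PROOFS =====

def pvF (a : List Int) (i : Int) : Int := PySem.List.pyGetD a i 0

-- the common specification: positions with equal permutation values carry equal a-values
def pvSpec (a : List Int) (perm : List Int) : Prop :=
  ∀ p ∈ PySem.List.enumerate perm 0, ∀ q ∈ PySem.List.enumerate perm 0,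
    p.2 = q.2 → pvF a p.1 = pvF a q.1

def pvGrpIdx (perm : List Int) (v : Int) : List Int :=
  ((PySem.List.enumerate perm).filter (fun p => p.2 == v)).map (fun p => p.1)

def pvFirst (perm : List Int) (v : Int) : Int :=
  PySem.List.pyGetD (pvGrpIdx perm v) 0 0

lemma pvGoA_iff (a : List Int) (items : List (Int × Int)) (seen : PySem.Dict Int Int) :
    pvGoA a items seen = true ↔
      ((∀ p ∈ items, ∀ pos, seen.get? p.2 = some pos → pvF a pos = pvF a p.1) ∧
       (∀ p ∈ items, ∀ q ∈ items, p.2 = q.2 → seen.get? p.2 = none →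
          pvF a p.1 = pvF a q.1)) := by
  induction items generalizing seen with
  | nil => simp [pvGoA]
  | cons hd rest ih =>
    obtain ⟨index, mapped⟩ := hd
    simp only [pvF] at *
    cases hseen : seen.get? mapped with
    | some pos =>
      by_cases heq : PySem.List.pyGetD a pos 0 = PySem.List.pyGetD a index 0
      · rw [show pvGoA a ((index, mapped) :: rest) seen = pvGoA a rest seen by
          simp [pvGoA, hseen, heq]]
        rw [ih]
        constructor
        · rintro ⟨h1, h2⟩
          refine ⟨?_, ?_⟩
          · intro p hp pos' hpos'
            rcases List.mem_cons.mp hp with hp | hp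
            · subst hp; simp only at hpos'; rw [hseen] at hpos'; cases hpos'; exact heq
            · exact h1 p hp pos' hpos'
          · intro p hp q hq hpq hnone
            rcases List.mem_cons.mp hp with hp | hp
            · subst hp; simp only at hnone; rw [hnone] at hseen; cases hseen
            · rcases List.mem_cons.mp hq with hq | hq
              · subst hq; simp only at hpq; rw [hpq] at hnone; rw [hnone] at hseen; cases hseen
              · exact h2 p hp q hq hpq hnone
        · rintro ⟨h1, h2⟩
          exact ⟨fun p hp => h1 p (List.mem_cons_of_mem _ hp),
                 fun p hp q hq => h2 p (List.mem_cons_of_mem _ hp) q (List.mem_cons_of_mem _ hq)⟩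
      · rw [show pvGoA a ((index, mapped) :: rest) seen = false by
          simp [pvGoA, hseen, heq]]
        simp only [Bool.false_eq_true, false_iff, not_and_or]
        left
        intro h1
        exact heq (h1 (index, mapped) (List.mem_cons_self ..) pos hseen)
    | none =>
      rw [show pvGoA a ((index, mapped) :: rest) seen = pvGoA a rest (seen.insert mapped index) by
          simp [pvGoA, hseen]]
      rw [ih]
      constructor
      · rintro ⟨h1, h2⟩
        constructor
        · intro p hp pos hpos
          rcases List.mem_cons.mp hp with hp | hp
          · subst hp; simp only at hpos; rw [hseen] at hpos; cases hpos
          · by_cases hv : p.2 = mapped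
            · rw [hv, hseen] at hpos; cases hpos
            · exact h1 p hp pos (by rw [PySem.Dict.get?_insert_of_ne seen index hv]; exact hpos)
        · intro p hp q hq hpq hnone
          rcases List.mem_cons.mp hp with hp | hp
          · rcases List.mem_cons.mp hq with hq | hq
            · subst hp; subst hq; rfl
            · subst hp
              simp only at hpq hnone ⊢
              exact h1 q hq index (by rw [← hpq, PySem.Dict.get?_insert_self])
          · rcases List.mem_cons.mp hq with hq | hq
            · subst hq
              simp only at hpq ⊢
              exact (h1 p hp index (by rw [hpq, PySem.Dict.get?_insert_self])).symm
            · by_cases hv : p.2 = mapped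
              · have e1 := h1 p hp index (by rw [hv, PySem.Dict.get?_insert_self])
                have e2 := h1 q hq index (by rw [← hpq, hv, PySem.Dict.get?_insert_self])
                exact e1.symm.trans e2
              · exact h2 p hp q hq hpq
                  (by rw [PySem.Dict.get?_insert_of_ne seen index hv]; exact hnone)
      · rintro ⟨h1, h2⟩
        constructor
        · intro p hp pos hpos
          by_cases hv : p.2 = mapped
          · rw [hv, PySem.Dict.get?_insert_self] at hpos
            cases hpos
            exact h2 (index, mapped) (List.mem_cons_self ..) p (List.mem_cons_of_mem _ hp)
              hv.symm hseen
          · exact h1 p (List.mem_cons_of_mem _ hp) pos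
              (by rw [PySem.Dict.get?_insert_of_ne seen index hv] at hpos; exact hpos)
        · intro p hp q hq hpq hnone
          by_cases hv : p.2 = mapped
          · rw [hv, PySem.Dict.get?_insert_self] at hnone; cases hnone
          · exact h2 p (List.mem_cons_of_mem _ hp) q (List.mem_cons_of_mem _ hq) hpq
              (by rw [PySem.Dict.get?_insert_of_ne seen index hv] at hnone; exact hnone)

lemma checkA_iff (a perm : List Int) :
    pvGoA a (PySem.List.enumerate perm) PySem.Dict.empty = true ↔ pvSpec a perm := by
  rw [pvGoA_iff]
  unfold pvSpec
  simp [PySem.Dict.get?_empty]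

lemma pvGroups_getD (perm : List Int) (v : Int) :
    (pvGroups perm).getD v [] = pvGrpIdx perm v := by
  unfold pvGroups pvGrpIdx
  have hfold : (PySem.List.enumerate perm).foldl
      (fun g p => g.modify p.2 [] (fun l => l ++ [p.1])) PySem.Dict.empty
      = ((PySem.List.enumerate perm).map (fun p => (p.2, p.1))).foldl
      (fun g q => g.modify q.1 [] (fun l => l ++ [q.2])) PySem.Dict.empty := by
    rw [List.foldl_map]
  rw [hfold, PySem.Dict.getD_foldl_modify_append]
  simp [List.filter_map, List.map_map, Function.comp_def, PySem.Dict.getD_empty]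

lemma mem_grpIdx {perm : List Int} {v i : Int} :
    i ∈ pvGrpIdx perm v ↔ ∃ p ∈ PySem.List.enumerate perm 0, p.1 = i ∧ p.2 = v := by
  simp only [pvGrpIdx, List.mem_map, List.mem_filter, beq_iff_eq]
  constructor
  · rintro ⟨p, ⟨hm, hv⟩, hi⟩; exact ⟨p, hm, hi, hv⟩
  · rintro ⟨p, hm, hi, hv⟩; exact ⟨p, ⟨hm, hv⟩, hi⟩

lemma snd_mem_perm {perm : List Int} {p : Int × Int} (hp : p ∈ PySem.List.enumerate perm 0) :
    p.2 ∈ perm := by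
  have := List.mem_map_of_mem (f := fun x => x.2) hp
  rwa [PySem.List.map_snd_enumerate] at this

lemma first_mem {perm : List Int} {v : Int} (hv : v ∈ perm) :
    (pvFirst perm v, v) ∈ PySem.List.enumerate perm 0 := by
  have hne : pvGrpIdx perm v ≠ [] := by
    have hmem : v ∈ (PySem.List.enumerate perm 0).map (fun x => x.2) := by
      rw [PySem.List.map_snd_enumerate]; exact hv
    obtain ⟨p, hp, hpe⟩ := List.mem_map.mp hmem
    exact List.ne_nil_of_mem (mem_grpIdx.mpr ⟨p, hp, rfl, hpe⟩)
  obtain ⟨h, t, hht⟩ := List.exists_cons_of_ne_nil hne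
  have hhead : pvFirst perm v = h := by
    rw [pvFirst, hht]; simp [PySem.List.pyGetD, PySem.List.pyGet?, PySem.List.pyIdx?]
  have hmem : h ∈ pvGrpIdx perm v := by rw [hht]; exact List.mem_cons_self ..
  obtain ⟨p, hp, hp1, hp2⟩ := mem_grpIdx.mp hmem
  have : p = (h, v) := by rw [← hp1, ← hp2]
  rw [hhead, ← this]; exact hp

lemma checkB_iff (a perm : List Int) :
    (pvConstraints perm).all
      (fun fi => PySem.List.pyGetD a fi.1 0 == PySem.List.pyGetD a fi.2 0) = true ↔
    pvSpec a perm := by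
  have hconstr : pvConstraints perm =
      ((PySem.List.enumerate perm).filter (fun p => pvFirst perm p.2 != p.1)).map
        (fun p => (pvFirst perm p.2, p.1)) := by
    simp [pvConstraints, pvGroups_getD, pvFirst]
  rw [hconstr, List.all_eq_true]
  constructor
  · intro hall p hp q hq hpq
    have key : ∀ r ∈ PySem.List.enumerate perm 0, pvF a (pvFirst perm r.2) = pvF a r.1 := by
      intro r hr
      by_cases h : pvFirst perm r.2 = r.1
      · rw [h]
      · have hmem : (pvFirst perm r.2, r.1) ∈
            ((PySem.List.enumerate perm).filter (fun p => pvFirst perm p.2 != p.1)).map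
              (fun p => (pvFirst perm p.2, p.1)) :=
          List.mem_map_of_mem (List.mem_filter.mpr ⟨hr, by simpa using h⟩)
        have := hall _ hmem
        simpa [pvF] using this
    have e1 := key p hp
    have e2 := key q hq
    rw [hpq] at e1
    exact e1.symm.trans e2
  · intro hspec x hx
    obtain ⟨r, hrf, rfl⟩ := List.mem_map.mp hx
    have hr := (List.mem_filter.mp hrf).1
    have hfm : (pvFirst perm r.2, r.2) ∈ PySem.List.enumerate perm 0 :=
      first_mem (snd_mem_perm hr)
    have := hspec _ hfm _ hr rfl
    simpa [pvF] using this

lemma check_eq (a perm : List Int) :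
    pvGoA a (PySem.List.enumerate perm) PySem.Dict.empty
      = (pvConstraints perm).all
          (fun fi => PySem.List.pyGetD a fi.1 0 == PySem.List.pyGetD a fi.2 0) := by
  rw [Bool.eq_iff_iff, checkA_iff, checkB_iff]

lemma foldl_if_filter {α : Type} (q : α → Bool) (l : List α) (acc : List α) :
    l.foldl (fun r x => if q x then r ++ [x] else r) acc = acc ++ l.filter q := by
  induction l generalizing acc with
  | nil => simp
  | cons hd tl ih =>
    by_cases h : q hd = true <;> simp [h, ih]

-- ===== VERDICT (by name: the statement is the Claim_ definition above) =====
theorem find_delta_spec : Claim_equal_find_delta := by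
  intro dA dC perm _ _
  unfold Spec_find_delta find_delta find_delta_alt
  rw [foldl_if_filter]
  rw [List.nil_append]
  exact List.filter_congr (fun p _ => check_eq p.1 perm)
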